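-- pv_equiv track=rewrite | github.com/alexandraback/datacollection | solutions_5669245564223488_0/Python/paramaciej/1B.py | spojny
-- ===== SOURCE A (Python) =====
-- def spojny(s):
--     used = {}
--     pop = ''
--     fail = False
--     for c in s:
--         if c != pop:
--             pop = c
--             if c in used:
--                 fail = True
--             else:
--                 used[c] = True
--     return not fail
-- ===== SOURCE B (Python) =====
-- def spojny(s):
--     while s:
--         c = s[0]
--         s = s.lstrip(c)
--         if c in s:
--             return False
--     return True
-- ===== Notes on version B (the rewrite author's own statement) =====
-- stated objective: alternative
-- what changed: Replaces A's single forward pass that records seen run-leaders in a dict with a fail flag by a consume-and-look-ahead loop with no auxiliary structure: repeatedly strip the leading run with lstrip and fail if that character still occurs anywhere in the remaining suffix.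
import Mathlib
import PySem

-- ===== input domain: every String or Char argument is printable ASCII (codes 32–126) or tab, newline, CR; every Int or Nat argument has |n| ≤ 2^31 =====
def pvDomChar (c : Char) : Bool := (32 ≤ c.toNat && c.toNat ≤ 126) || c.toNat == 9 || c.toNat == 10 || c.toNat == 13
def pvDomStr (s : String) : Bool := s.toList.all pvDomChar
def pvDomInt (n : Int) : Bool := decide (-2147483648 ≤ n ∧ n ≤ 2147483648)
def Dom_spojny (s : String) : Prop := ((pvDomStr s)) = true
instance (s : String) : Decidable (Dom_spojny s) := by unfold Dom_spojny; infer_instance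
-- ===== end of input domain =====

-- B replaces A's single pass with a seen-dict and fail flag by a consume-and-look-ahead loop
-- with no auxiliary structure: strip the leading run, fail if that char recurs in the suffix.

-- ===== PORT A =====
-- Python's 'pop' starts as '' (never equal to a char): ported as Option Char, none initially.
def spojnyStep (st : PySem.Dict Char Bool × Option Char × Bool) (c : Char) :
    PySem.Dict Char Bool × Option Char × Bool :=
  if st.2.1 ≠ some c then
    if st.1.contains c then (st.1, some c, true)
    else (st.1.insert c true, some c, st.2.2)
  else st

def spojny (s : String) : Bool :=
  !(s.toList.foldl spojnyStep (PySem.Dict.empty, none, false)).2.2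

-- ===== PORT B =====
-- the while loop of Source B as recursion on the shrinking string: s.lstrip(s[0]) on a string
-- with head c drops exactly the leading run of c (= dropWhile (· == c) on the tail)
def spojnyAltLoop : List Char → Bool
  | [] => true
  | c :: cs =>
      let rest := cs.dropWhile (· == c)
      if rest.contains c then false else spojnyAltLoop rest
  termination_by l => l.length
  decreasing_by
    simp only [List.length_cons]
    exact Nat.lt_succ_of_le (List.length_dropWhile_le _ _)

def spojny_alt (s : String) : Bool := spojnyAltLoop s.toList

-- ===== PRECONDITION & SPEC =====
def Spec_spojny (s : String) (out : Bool) : Prop := out = spojny_alt s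
instance (s : String) (out : Bool) : Decidable (Spec_spojny s out) := by unfold Spec_spojny; infer_instance

-- ===== CLAIM (what is proved, stated in full; the proofs are below) =====
def Claim_equal_spojny : Prop := ∀ (s : String), Dom_spojny s → Spec_spojny s (spojny s)

-- ===== LEMMAS AND PROOFS =====

-- run-leading characters with 'previous char' p (proof-side characterisation)
def runKeys (p : Option Char) : List Char → List Char
  | [] => []
  | c :: cs => if p ≠ some c then c :: runKeys (some c) cs else runKeys p cs

theorem mem_of_mem_runKeys {x : Char} {l : List Char} (p : Option Char)
    (h : x ∈ runKeys p l) : x ∈ l := by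
  induction l generalizing p with
  | nil => simp [runKeys] at h
  | cons c cs ih =>
    rw [runKeys] at h
    split at h
    · rcases List.mem_cons.1 h with h | h
      · simp [h]
      · exact List.mem_cons_of_mem _ (ih _ h)
    · exact List.mem_cons_of_mem _ (ih _ h)

theorem mem_runKeys_of_mem {x : Char} {l : List Char} {p : Option Char}
    (hx : x ∈ l) (hp : p ≠ some x) : x ∈ runKeys p l := by
  induction l generalizing p with
  | nil => simp at hx
  | cons c cs ih =>
    rw [runKeys]
    by_cases hc : p = some c
    · rw [if_neg (by simp [hc])]
      have hxc : x ≠ c := by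
        intro e; exact hp (by rw [e, hc])
      exact ih (by rcases List.mem_cons.1 hx with h | h; exact absurd h hxc; exact h) hp
    · rw [if_pos (by simp [hc])]
      rcases List.mem_cons.1 hx with h | h
      · exact h ▸ List.mem_cons_self
      · by_cases hxc : x = c
        · exact hxc ▸ List.mem_cons_self
        · exact List.mem_cons_of_mem _ (ih h (by intro e; exact hxc (Option.some.inj e).symm))

theorem runKeys_some_eq_dropWhile (c : Char) (l : List Char) :
    runKeys (some c) l = runKeys none (l.dropWhile (· == c)) := by
  induction l with
  | nil => rfl
  | cons d ds ih =>
    by_cases h : d = c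
    · subst h
      rw [runKeys, if_neg (by simp), List.dropWhile_cons_of_pos (by simp)]
      exact ih
    · rw [runKeys, if_pos (by simp [Ne.symm h]),
        List.dropWhile_cons_of_neg (by simp [h]), runKeys, if_pos (by simp)]

theorem loopA (l : List Char) (d : PySem.Dict Char Bool) (p : Option Char) (f : Bool)
    (hnd : d.keys.Nodup) :
    (l.foldl spojnyStep (d, p, f)).2.2 = (f || !decide ((d.keys ++ runKeys p l).Nodup)) := by
  induction l generalizing d p f with
  | nil => simp [runKeys, hnd]
  | cons c cs ih =>
    rw [List.foldl_cons]
    by_cases hp : p = some c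
    · subst hp
      rw [runKeys, if_neg (by simp)]
      have hstep : spojnyStep (d, some c, f) c = (d, some c, f) := by
        simp [spojnyStep]
      rw [hstep]
      exact ih d (some c) f hnd
    · rw [runKeys, if_pos (by simp [hp])]
      by_cases hc : d.contains c = true
      · have hstep : spojnyStep (d, p, f) c = (d, some c, true) := by
          simp [spojnyStep, hp, hc]
        rw [hstep, ih d (some c) true hnd]
        have hmem : c ∈ d.keys := (PySem.Dict.contains_iff_mem_keys d c).1 hc
        have hnn : ¬ (d.keys ++ c :: runKeys (some c) cs).Nodup := by
          intro hn
          rcases List.nodup_append.1 hn with ⟨_, _, hdisj⟩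
          exact hdisj c hmem c (by simp) rfl
        simp [hnn]
      · have hc' : d.contains c = false := by simpa using hc
        have hstep : spojnyStep (d, p, f) c = (d.insert c true, some c, f) := by
          simp [spojnyStep, hp, hc']
        rw [hstep, ih (d.insert c true) (some c) f
          (PySem.Dict.nodup_keys_insert d c true hnd),
          PySem.Dict.keys_insert_of_not_contains d true hc', List.append_assoc]
        rfl

theorem altLoop_eq_nodup_runKeys (l : List Char) :
    spojnyAltLoop l = decide (runKeys none l).Nodup := by
  have H : ∀ n (l : List Char), l.length ≤ n →
      spojnyAltLoop l = decide (runKeys none l).Nodup := by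
    intro n
    induction n with
    | zero =>
      intro l hl
      have : l = [] := List.length_eq_zero_iff.1 (Nat.le_zero.1 hl)
      subst this
      rw [spojnyAltLoop.eq_def]; simp [runKeys]
    | succ n ih =>
      intro l hl
      match l with
      | [] => rw [spojnyAltLoop.eq_def]; simp [runKeys]
      | c :: cs =>
        have hrk : runKeys none (c :: cs) = c :: runKeys none (cs.dropWhile (· == c)) := by
          rw [runKeys, if_pos (by simp), runKeys_some_eq_dropWhile]
        rw [spojnyAltLoop.eq_def]; dsimp only; rw [hrk]
        simp only [List.length_cons, Nat.succ_le_succ_iff] at hl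
        by_cases hmem : c ∈ cs.dropWhile (· == c)
        · have hck : c ∈ runKeys none (cs.dropWhile (· == c)) :=
            mem_runKeys_of_mem hmem (by simp)
          simp [hmem, List.nodup_cons, hck]
        · have hck : c ∉ runKeys none (cs.dropWhile (· == c)) := by
            intro h
            exact hmem (mem_of_mem_runKeys _ h)
          rw [if_neg (by simpa using hmem),
            ih _ (le_trans (List.length_dropWhile_le _ _) hl)]
          simp [List.nodup_cons, hck]
  exact H l.length l le_rfl

-- ===== VERDICT (by name: the statement is the Claim_ definition above) =====
theorem spojny_spec : Claim_equal_spojny := by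
  intro s _
  unfold Spec_spojny spojny spojny_alt
  rw [loopA s.toList PySem.Dict.empty none false (by simp [PySem.Dict.keys_empty]),
    altLoop_eq_nodup_runKeys]
  simp [PySem.Dict.keys_empty]
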